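-- pv_equiv track=rewrite | github.com/cpuglis1/red_teaming_challenge_openai_oss_20b | scripts/eval/quick_validate.py | pick_scenarios
-- ===== SOURCE A (Python) =====
-- def pick_scenarios(rows):
--     preferred = [
--         "control", "exam_template", "live_ui",
--         "exam_ablate", "exam_flip",
--         "hidden_exam", "hidden_live",
--         "exam_template_neutral", "live_ui_neutral",
--         "meta_exam", "meta_live",
--         "exam_explicit_ablate_user", "exam_explicit_ablate_system",
--         "meta_env", "meta_workflow", "meta_qa", "meta_placebo",
--         "doc_injection", "doc_override", "security_public", "security_restricted",
--     ]
--     have = []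
--     seen = set()
--     for r in rows:
--         s = str(r.get("scenario",""))
--         if s and s not in seen:
--             have.append(s)
--             seen.add(s)
--     order = [s for s in preferred if s in seen] + [s for s in have if s not in preferred]
--     if len(order) < 2:
--         raise SystemExit(f"Need at least 2 scenarios; got {have}")
--     return order
-- ===== SOURCE B (Python) =====
-- def pick_scenarios(rows):
--     preferred = [
--         "control", "exam_template", "live_ui",
--         "exam_ablate", "exam_flip",
--         "hidden_exam", "hidden_live",
--         "exam_template_neutral", "live_ui_neutral",
--         "meta_exam", "meta_live",
--         "exam_explicit_ablate_user", "exam_explicit_ablate_system",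
--         "meta_env", "meta_workflow", "meta_qa", "meta_placebo",
--         "doc_injection", "doc_override", "security_public", "security_restricted",
--     ]
--     # ordered dedup via dict.fromkeys, then drop the empty name
--     names = [str(r.get("scenario", "")) for r in rows]
--     have = [s for s in dict.fromkeys(names) if s]
--     # counting-sort by priority: one pass over `have` into priority buckets
--     L = len(preferred)
--     pref_index = {name: i for i, name in enumerate(preferred)}
--     buckets = [[] for _ in range(L + 1)]
--     for s in have:
--         buckets[pref_index.get(s, L)].append(s)
--     order = [s for b in buckets for s in b]
--     if len(order) < 2:
--         raise SystemExit(f"Need at least 2 scenarios; got {have}")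
--     return order
-- ===== Notes on version B (the rewrite author's own statement) =====
-- stated objective: alternative
-- what changed: Dedup is done idiomatically via dict.fromkeys instead of A's append/seen loop, and A's two concatenated filter passes (over preferred, then over have with a list scan of preferred) are replaced by a counting sort: a priority-index dict built once and a single pass over have dropping each name into a priority bucket, buckets concatenated in order.
import Mathlib
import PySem

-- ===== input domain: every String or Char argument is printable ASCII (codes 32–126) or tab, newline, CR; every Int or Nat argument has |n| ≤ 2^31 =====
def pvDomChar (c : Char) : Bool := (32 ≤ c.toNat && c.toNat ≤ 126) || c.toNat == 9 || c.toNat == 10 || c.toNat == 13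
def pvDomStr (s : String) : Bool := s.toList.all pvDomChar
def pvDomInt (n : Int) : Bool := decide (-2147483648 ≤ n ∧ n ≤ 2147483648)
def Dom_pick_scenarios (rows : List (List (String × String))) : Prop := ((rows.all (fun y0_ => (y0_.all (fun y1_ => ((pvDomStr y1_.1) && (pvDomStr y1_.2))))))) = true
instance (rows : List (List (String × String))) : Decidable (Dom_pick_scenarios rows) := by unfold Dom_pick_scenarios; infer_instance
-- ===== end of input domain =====

-- B replaces A's two concatenated filter passes by a counting sort into priority buckets (alternative algorithm, same cost).
-- Both Pythons raise SystemExit when fewer than 2 distinct non-empty scenario names exist; those inputs are outside Pre_.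

-- the literal `preferred` list both Pythons start with
def pvPreferred : List String :=
  ["control", "exam_template", "live_ui",
   "exam_ablate", "exam_flip",
   "hidden_exam", "hidden_live",
   "exam_template_neutral", "live_ui_neutral",
   "meta_exam", "meta_live",
   "exam_explicit_ablate_user", "exam_explicit_ablate_system",
   "meta_env", "meta_workflow", "meta_qa", "meta_placebo",
   "doc_injection", "doc_override", "security_public", "security_restricted"]

-- ===== PORT A =====
-- A's dedup loop body:
--   s = str(r.get("scenario","")); if s and s not in seen: have.append(s); seen.add(s)
def pvDedupStep (acc : List String × PySem.Set String) (r : List (String × String)) :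
    List String × PySem.Set String :=
  let s := PySem.Dict.getD (PySem.Dict.mk r) "scenario" ""
  if s != "" && !(PySem.Set.contains acc.2 s) then (acc.1 ++ [s], PySem.Set.add acc.2 s) else acc

def pick_scenarios (rows : List (List (String × String))) : List String :=
  let preferred := pvPreferred
  let hs := rows.foldl pvDedupStep ([], PySem.Set.empty)
  let have_ := hs.1
  let seen := hs.2
  let order := preferred.filter (fun s => PySem.Set.contains seen s)
      ++ have_.filter (fun s => !(preferred.contains s))
  -- `if len(order) < 2: raise SystemExit(...)` — the raising inputs are excluded by Pre_
  order

-- ===== PORT B =====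
def pick_scenarios_alt (rows : List (List (String × String))) : List String :=
  let preferred := pvPreferred
  -- names = [str(r.get("scenario", "")) for r in rows]
  let names := rows.map (fun r => PySem.Dict.getD (PySem.Dict.mk r) "scenario" "")
  -- have = [s for s in dict.fromkeys(names) if s]
  let have_ := (PySem.List.dedup names).filter (fun s => s != "")
  let L := preferred.length
  -- pref_index = {name: i for i, name in enumerate(preferred)}
  let pref_index := (PySem.List.enumerate preferred).foldl
      (fun (d : PySem.Dict String Int) p => d.insert p.2 p.1) PySem.Dict.empty
  -- buckets = [[] for _ in range(L + 1)]
  let buckets0 : List (List String) := (List.range (L + 1)).map (fun _ => [])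
  -- for s in have: buckets[pref_index.get(s, L)].append(s)
  -- (pref_index values are the indices 0..L, all ≥ 0, so .toNat is exact here)
  let buckets := have_.foldl (fun bs s =>
      let k := (PySem.Dict.getD pref_index s (L : Int)).toNat
      bs.set k ((bs.getD k []) ++ [s])) buckets0
  let order := buckets.flatten
  -- `if len(order) < 2: raise SystemExit(...)` — the raising inputs are excluded by Pre_
  order

-- ===== PRECONDITION & SPEC =====
-- Pre_ excludes exactly the inputs with fewer than 2 distinct non-empty "scenario" values, on which
-- the Python A (and B alike) raises SystemExit instead of returning.
def Pre_pick_scenarios (rows : List (List (String × String))) : Prop :=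
  2 ≤ (PySem.Set.ofList ((rows.map
        (fun r => PySem.Dict.getD (PySem.Dict.mk r) "scenario" "")).filter
        (fun s => s != ""))).length
instance (rows : List (List (String × String))) : Decidable (Pre_pick_scenarios rows) := by
  unfold Pre_pick_scenarios; infer_instance

def pvWitness_pick_scenarios : (List (List (String × String))) :=
  [[("scenario", "zeta")], [("scenario", "control")]]

def Spec_pick_scenarios (rows : List (List (String × String))) (out : List String) : Prop := out = pick_scenarios_alt rows
instance (rows : List (List (String × String))) (out : List String) : Decidable (Spec_pick_scenarios rows out) := by unfold Spec_pick_scenarios; infer_instance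

-- ===== CLAIM (what is proved, stated in full; the proofs are below) =====
def Claim_equal_pick_scenarios : Prop := ∀ (rows : List (List (String × String))), Dom_pick_scenarios rows → Pre_pick_scenarios rows → Spec_pick_scenarios rows (pick_scenarios rows)

-- ===== LEMMAS AND PROOFS =====

-- rank of a string in a list: its index, or the list's length when absent
def pvRank : List String → String → Nat
  | [], _ => 0
  | p :: P, s => if s = p then 0 else pvRank P s + 1

lemma pvRank_le (P : List String) (s : String) : pvRank P s ≤ P.length := by
  induction P with
  | nil => simp [pvRank]
  | cons p P ih => simp only [pvRank, List.length_cons]; split <;> omega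

lemma pvKey_eq_rank (s : String) :
    (PySem.Dict.getD ((PySem.List.enumerate pvPreferred).foldl
      (fun (d : PySem.Dict String Int) p => d.insert p.2 p.1) PySem.Dict.empty)
      s (pvPreferred.length : Int)).toNat = pvRank pvPreferred s := by
  by_cases h1 : s = "control"
  · subst h1; decide
  by_cases h2 : s = "exam_template"
  · subst h2; decide
  by_cases h3 : s = "live_ui"
  · subst h3; decide
  by_cases h4 : s = "exam_ablate"
  · subst h4; decide
  by_cases h5 : s = "exam_flip"
  · subst h5; decide
  by_cases h6 : s = "hidden_exam"
  · subst h6; decide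
  by_cases h7 : s = "hidden_live"
  · subst h7; decide
  by_cases h8 : s = "exam_template_neutral"
  · subst h8; decide
  by_cases h9 : s = "live_ui_neutral"
  · subst h9; decide
  by_cases h10 : s = "meta_exam"
  · subst h10; decide
  by_cases h11 : s = "meta_live"
  · subst h11; decide
  by_cases h12 : s = "exam_explicit_ablate_user"
  · subst h12; decide
  by_cases h13 : s = "exam_explicit_ablate_system"
  · subst h13; decide
  by_cases h14 : s = "meta_env"
  · subst h14; decide
  by_cases h15 : s = "meta_workflow"
  · subst h15; decide
  by_cases h16 : s = "meta_qa"
  · subst h16; decide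
  by_cases h17 : s = "meta_placebo"
  · subst h17; decide
  by_cases h18 : s = "doc_injection"
  · subst h18; decide
  by_cases h19 : s = "doc_override"
  · subst h19; decide
  by_cases h20 : s = "security_public"
  · subst h20; decide
  by_cases h21 : s = "security_restricted"
  · subst h21; decide
  simp [pvRank, pvPreferred, PySem.Dict.getD_insert, PySem.Dict.getD_empty, PySem.List.enumerate, h1, h2, h3, h4, h5, h6, h7, h8, h9, h10, h11, h12, h13, h14, h15, h16, h17, h18, h19, h20, h21]

lemma dedup_loop (rows : List (List (String × String))) (h : List String) (hh : h.Nodup) :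
    rows.foldl pvDedupStep (h, h) =
      (PySem.Set.update h ((rows.map
        (fun r => PySem.Dict.getD (PySem.Dict.mk r) "scenario" "")).filter (fun s => s != "")),
       PySem.Set.update h ((rows.map
        (fun r => PySem.Dict.getD (PySem.Dict.mk r) "scenario" "")).filter (fun s => s != ""))) := by
  induction rows generalizing h with
  | nil => simp [PySem.Set.update_nil]
  | cons r rows ih =>
    simp only [List.foldl_cons, List.map_cons, pvDedupStep]
    by_cases h0 : PySem.Dict.getD (PySem.Dict.mk r) "scenario" "" = ""
    · simp only [h0]
      simpa using ih h hh
    · by_cases hc : PySem.Set.contains h (PySem.Dict.getD (PySem.Dict.mk r) "scenario" "") = true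
      · have hadd : PySem.Set.add h (PySem.Dict.getD (PySem.Dict.mk r) "scenario" "") = h := by
          simp [PySem.Set.add, (PySem.Set.contains_iff _ _).1 hc]
        simp only [hc, List.filter_cons]
        simp only [bne_iff_ne, ne_eq, h0, not_false_iff, if_true]
        rw [PySem.Set.update_cons, hadd]
        simpa [h0, hc] using ih h hh
      · have hmem : PySem.Dict.getD (PySem.Dict.mk r) "scenario" "" ∉ h := by
          intro hm; exact hc ((PySem.Set.contains_iff _ _).2 hm)
        have hnd : (h ++ [PySem.Dict.getD (PySem.Dict.mk r) "scenario" ""]).Nodup := by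
          exact List.Nodup.append hh (List.nodup_singleton _)
            (by simpa [List.disjoint_singleton] using hmem)
        have hadd : PySem.Set.add h (PySem.Dict.getD (PySem.Dict.mk r) "scenario" "") =
            h ++ [PySem.Dict.getD (PySem.Dict.mk r) "scenario" ""] := by
          simp [PySem.Set.add, hmem]
        simp only [List.filter_cons, bne_iff_ne, ne_eq, h0, not_false_iff, if_true]
        rw [PySem.Set.update_cons, hadd]
        have := ih (h ++ [PySem.Dict.getD (PySem.Dict.mk r) "scenario" ""]) hnd
        simpa [h0, hmem, hadd] using this

lemma bucket_loop_length (P : List String) (l : List String) (bs : List (List String)) :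
    (l.foldl (fun bs s =>
        bs.set (pvRank P s) ((bs.getD (pvRank P s) []) ++ [s])) bs).length = bs.length := by
  induction l generalizing bs with
  | nil => rfl
  | cons s l ih => simp only [List.foldl_cons]; rw [ih]; simp

lemma bucket_loop (P : List String) (l : List String) (bs : List (List String))
    (hlen : P.length + 1 ≤ bs.length) (i : Nat) :
    (l.foldl (fun bs s =>
        bs.set (pvRank P s) ((bs.getD (pvRank P s) []) ++ [s])) bs).getD i [] =
      bs.getD i [] ++ l.filter (fun s => pvRank P s == i) := by
  induction l generalizing bs with
  | nil => simp
  | cons s l ih =>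
    simp only [List.foldl_cons, List.filter_cons]
    have hk : pvRank P s < bs.length := lt_of_le_of_lt (pvRank_le P s) (by omega)
    rw [ih _ (by simp; omega)]
    by_cases he : pvRank P s = i
    · subst he
      simp [List.getD_eq_getElem?_getD, hk]
    · have : (pvRank P s == i) = false := by simp [he]
      rw [this]
      simp only [if_false, Bool.false_eq_true]
      congr 1
      simp [List.getD_eq_getElem?_getD, List.getElem?_set_ne, he]

lemma flatten_eq_range (bs : List (List String)) :
    bs.flatten = (List.range bs.length).flatMap (fun i => bs.getD i []) := by
  induction bs with
  | nil => simp
  | cons b bs ih =>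
    rw [List.flatten_cons, List.length_cons, List.range_succ_eq_map, List.flatMap_cons,
      List.flatMap_map, ih]
    simp

-- set(...) of a filtered list is the filtered set (first occurrences survive either way)
lemma ofList_filter (p : String → Bool) (xs : List String) :
    PySem.Set.ofList (xs.filter p) = (PySem.Set.ofList xs).filter p := by
  induction xs with
  | nil => rfl
  | cons x xs ih =>
    by_cases hx : p x = true
    · rw [List.filter_cons_of_pos hx, PySem.Set.ofList_cons, PySem.Set.ofList_cons, ih,
        List.filter_cons_of_pos hx]
      simp only [PySem.Set.discard, List.filter_filter]
      congr 1
      apply List.filter_congr; intro y _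
      by_cases hy : y = x <;> simp [hy, hx, Bool.and_comm]
    · rw [List.filter_cons_of_neg hx, PySem.Set.ofList_cons, ih, List.filter_cons_of_neg hx]
      simp only [PySem.Set.discard, List.filter_filter]
      apply List.filter_congr; intro y _
      by_cases hy : y = x <;> simp [hy, hx]

lemma countsort_eq (P H : List String) (hP : P.Nodup) (hH : H.Nodup) :
    (List.range (P.length + 1)).flatMap (fun i => H.filter (fun s => pvRank P s == i)) =
      P.filter (fun s => H.contains s) ++ H.filter (fun s => !(P.contains s)) := by
  induction P generalizing H with
  | nil =>
    simp [pvRank, List.filter]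
  | cons p P ih =>
    have hp : p ∉ P := (List.nodup_cons.1 hP).1
    have hP' : P.Nodup := (List.nodup_cons.1 hP).2
    rw [List.length_cons, List.range_succ_eq_map, List.flatMap_cons, List.flatMap_map]
    have h0 : H.filter (fun s => pvRank (p :: P) s == 0) = H.filter (fun s => s == p) := by
      apply List.filter_congr; intro s _
      simp only [pvRank]
      split <;> simp_all
    have hsucc : ∀ i : Nat, H.filter (fun s => pvRank (p :: P) s == i + 1) =
        (H.filter (fun s => !(s == p))).filter (fun s => pvRank P s == i) := by
      intro i
      rw [List.filter_filter]
      apply List.filter_congr; intro s _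
      by_cases he : s = p <;> simp only [pvRank, he, if_true, if_false] <;> simp [he]
    have hrec : ((List.range (P.length + 1)).flatMap
        (fun i => H.filter (fun s => pvRank (p :: P) s == i + 1))) =
        P.filter (fun s => (H.filter (fun s => !(s == p))).contains s)
          ++ (H.filter (fun s => !(s == p))).filter (fun s => !(P.contains s)) := by
      rw [show (fun i => H.filter (fun s => pvRank (p :: P) s == i + 1)) =
          (fun i => (H.filter (fun s => !(s == p))).filter (fun s => pvRank P s == i)) from
        funext hsucc]
      exact ih (H.filter (fun s => !(s == p))) hP' (hH.filter _)
    rw [h0]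
    simp only [Nat.succ_eq_add_one]
    rw [hrec]
    have e1 : List.filter (fun s => s == p) H = if H.contains p then [p] else [] := by
      by_cases hm : p ∈ H
      · simp [List.filter_beq, hm, List.count_eq_one_of_mem hH hm]
      · simp [List.filter_beq, hm, List.count_eq_zero.2 hm]
    have e3 : List.filter (fun s => (List.filter (fun s => !s == p) H).contains s) P =
        List.filter (fun s => H.contains s) P := by
      apply List.filter_congr; intro s hs
      have hsp : s ≠ p := fun e => hp (e ▸ hs)
      by_cases hm : s ∈ H <;> simp [List.mem_filter, hm, hsp]
    have e4 : List.filter (fun s => !P.contains s) (List.filter (fun s => !s == p) H) =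
        List.filter (fun s => !(p :: P).contains s) H := by
      rw [List.filter_filter]
      apply List.filter_congr; intro s _
      by_cases hsp : s = p <;> simp [hsp]
    rw [e1, e3, e4, List.filter_cons]
    split <;> simp

-- ===== VERDICT (by name: the statement is the Claim_ definition above) =====
theorem pick_scenarios_spec : Claim_equal_pick_scenarios := by
  intro rows _ _
  unfold Spec_pick_scenarios pick_scenarios pick_scenarios_alt
  dsimp only
  have hd : rows.foldl pvDedupStep ([], PySem.Set.empty) =
      (PySem.Set.ofList ((rows.map
        (fun r => PySem.Dict.getD (PySem.Dict.mk r) "scenario" "")).filter (fun s => s != "")),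
       PySem.Set.ofList ((rows.map
        (fun r => PySem.Dict.getD (PySem.Dict.mk r) "scenario" "")).filter (fun s => s != ""))) := by
    have := dedup_loop rows [] List.nodup_nil
    rw [PySem.Set.update_nil_left] at this
    exact this
  rw [hd]
  dsimp only
  simp only [PySem.Set.contains_eq_listContains]
  rw [PySem.List.dedup_eq_ofList, ← ofList_filter (fun s => s != "")
    (rows.map (fun r => PySem.Dict.getD (PySem.Dict.mk r) "scenario" ""))]
  have hH : (PySem.Set.ofList ((rows.map
      (fun r => PySem.Dict.getD (PySem.Dict.mk r) "scenario" "")).filter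
      (fun s => s != ""))).Nodup := PySem.Set.nodup_ofList _
  have hfun : (fun (bs : List (List String)) s =>
        bs.set ((PySem.Dict.getD ((PySem.List.enumerate pvPreferred).foldl
            (fun (d : PySem.Dict String Int) p => d.insert p.2 p.1) PySem.Dict.empty)
            s (pvPreferred.length : Int)).toNat)
          ((bs.getD ((PySem.Dict.getD ((PySem.List.enumerate pvPreferred).foldl
            (fun (d : PySem.Dict String Int) p => d.insert p.2 p.1) PySem.Dict.empty)
            s (pvPreferred.length : Int)).toNat) []) ++ [s])) =
      (fun (bs : List (List String)) s =>
        bs.set (pvRank pvPreferred s) ((bs.getD (pvRank pvPreferred s) []) ++ [s])) := by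
    funext bs s; rw [pvKey_eq_rank]
  rw [hfun, flatten_eq_range, bucket_loop_length]
  have hbs0 : ∀ i : Nat, (List.map (fun _ => ([] : List String))
      (List.range (pvPreferred.length + 1))).getD i [] = [] := by
    intro i
    rw [List.getD_eq_getElem?_getD, List.getElem?_map]
    cases (List.range (pvPreferred.length + 1))[i]? <;> rfl
  have hbuck : (fun i => ((PySem.Set.ofList ((rows.map
        (fun r => PySem.Dict.getD (PySem.Dict.mk r) "scenario" "")).filter
        (fun s => s != ""))).foldl (fun bs s =>
          bs.set (pvRank pvPreferred s) ((bs.getD (pvRank pvPreferred s) []) ++ [s]))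
        (List.map (fun _ => ([] : List String)) (List.range (pvPreferred.length + 1)))).getD i []) =
      (fun i => (PySem.Set.ofList ((rows.map
        (fun r => PySem.Dict.getD (PySem.Dict.mk r) "scenario" "")).filter
        (fun s => s != ""))).filter (fun s => pvRank pvPreferred s == i)) := by
    funext i
    rw [bucket_loop pvPreferred _ _ (by simp) i, hbs0 i, List.nil_append]
  rw [hbuck, List.length_map, List.length_range]
  exact (countsort_eq pvPreferred _ (by decide) hH).symm
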